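-- pv_equiv track=rewrite | github.com/douglasbolis/tokenizador | old/lib_ProcessamentoDeDados.py | codifica
-- ===== SOURCE A (Python) =====
-- def tokenizador(ptxt):
-- 	tokens = [] ; lstposicoes = [] ; texto = '' ; strbuffer = '' ; posicao = 0 ; p = 0
--
-- 	texto = insereEspacos(ptxt)
-- 	separad = Separadores(texto)
--
--
-- 	while posicao < len(texto):
-- 		if texto[posicao] not in separad:
-- 			strbuffer+=texto[posicao]
--
-- 		else:
-- 			if strbuffer!='':
-- 				tokens.append(strbuffer)
-- 				strbuffer=''
-- 			if texto[posicao] != ' ':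
-- 				tokens.append(texto[posicao])
-- 		posicao+=1
--
-- 	if strbuffer!='':
-- 		tokens.append(strbuffer)
--
-- 	return tokens,lstposicoes
--
-- def codifica(ptexto):
-- 	dicTipos = {0:['de','da','do','das','dos','ao','às','aos','à','dum','duma','duns','dumas','no','na','nos','nas','num','numa','nuns','numas','por','pelo','pela','pelos','pelas'],1:['o','a','os','as','um','uns','uma','umas'],2:['e','nem','mas também','como também','bem como','mas','porém','todavia','contudo','logo','portanto','por conseguinte','que','porque','porquanto','pois']} ; count=0
-- 	codigos = ['p','a','c']
-- 	txtCodificado = ''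
-- 	tokens=tokenizador(ptexto)[0]
-- 	numBuffer = ''
-- 	separador = True
-- 	chave = 0
--
--
-- 	if len(tokens)==0:
-- 		return ''
--
-- 	for i in tokens:
-- 		chave = 0
-- 		separador = True
-- 		while chave < 3:
-- 			if i.lower() in dicTipos[chave]:
-- 				txtCodificado+=codigos[chave]
-- 				separador = False
--
-- 			chave+=1
--
--
-- 		if separador == True:
-- 			if i[0].isupper():
-- 				txtCodificado+='M'
-- 				separador = False
--
-- 			else:
-- 				if i[0].islower():
-- 					txtCodificado+='m'
-- 					separador = False
-- 				else:
-- 					if i.isdigit():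
-- 						txtCodificado+='N'
-- 						separador = False
--
-- 		if separador == True:
-- 			txtCodificado+=i
--
-- 	return txtCodificado
--
-- def Separadores(strTexto):
-- 	lstSeparadores = ''
--
-- 	for i in strTexto:
-- 		teste = i.isdigit() or i.isupper() or i.islower()
-- 		if not teste and i!='\n':
-- 			lstSeparadores+=i
--
-- 	lstSeparadores+='º'+'ª'+'°'
--
-- 	return lstSeparadores
--
-- def insereEspacos(strTexto):
-- 	newTexto = '' ; strbuffer='' ; separadores = ''
--
-- 	separadores = Separadores(strTexto)
--
-- 	if len(strTexto)>0:
-- 		for caracter in strTexto: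
-- 			if caracter not in separadores and caracter!='\n':
-- 				newTexto+=caracter
-- 			else:
-- 				if caracter!='\n':
-- 					newTexto+=' '+caracter+' '
-- 				else:
-- 					newTexto+='. '
-- 	return newTexto
-- ===== SOURCE B (Python) =====
-- # Single-pass character scanner: no intermediate spaced text, no separator
-- # string, no token list -- codes are emitted directly while scanning.
-- _TABELA = {
-- 	palavra: codigo
-- 	for codigo, palavras in (
-- 		('p', ['de','da','do','das','dos','ao','às','aos','à','dum','duma','duns','dumas','no','na','nos','nas','num','numa','nuns','numas','por','pelo','pela','pelos','pelas']),
-- 		('a', ['o','a','os','as','um','uns','uma','umas']),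
-- 		('c', ['e','nem','mas também','como também','bem como','mas','porém','todavia','contudo','logo','portanto','por conseguinte','que','porque','porquanto','pois']),
-- 	)
-- 	for palavra in palavras
-- }
--
-- def _cod_palavra(w):
-- 	c = _TABELA.get(w.lower())
-- 	if c is not None:
-- 		return c
-- 	if w[0].isupper():
-- 		return 'M'
-- 	if w[0].islower():
-- 		return 'm'
-- 	if w.isdigit():
-- 		return 'N'
-- 	return w
--
-- def codifica(ptexto):
-- 	out = []
-- 	buf = []
-- 	for ch in ptexto:
-- 		if ch.isdigit() or ch.isupper() or ch.islower():
-- 			buf.append(ch)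
-- 		else:
-- 			if buf:
-- 				out.append(_cod_palavra(''.join(buf)))
-- 				buf = []
-- 			if ch == '\n':
-- 				out.append('.')
-- 			elif ch != ' ':
-- 				out.append(ch)
-- 	if buf:
-- 		out.append(_cod_palavra(''.join(buf)))
-- 	return ''.join(out)
-- ===== Notes on version B (the rewrite author's own statement) =====
-- stated objective: faster
-- what changed: B replaces A's four staged passes (build the separator string, build the spaced-out text, tokenize it with a buffer, then classify each token by scanning three category lists) with one character-level scan of the raw text that buffers alphanumeric runs and emits each code immediately via a flat word-to-code dict, never materializing the spaced text, the separator string or the token list.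
import Mathlib
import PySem

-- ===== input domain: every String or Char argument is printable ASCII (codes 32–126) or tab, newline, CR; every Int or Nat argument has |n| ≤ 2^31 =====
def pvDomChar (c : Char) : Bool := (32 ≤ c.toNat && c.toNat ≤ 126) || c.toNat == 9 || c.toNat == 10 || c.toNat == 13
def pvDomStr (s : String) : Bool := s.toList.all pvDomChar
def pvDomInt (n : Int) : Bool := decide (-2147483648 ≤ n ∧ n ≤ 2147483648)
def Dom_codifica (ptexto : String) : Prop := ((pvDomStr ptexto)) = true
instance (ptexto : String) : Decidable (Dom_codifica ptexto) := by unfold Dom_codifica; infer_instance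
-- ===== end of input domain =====

-- B fuses A's staged pipeline (build spaced text, build separator string, tokenize, classify each
-- token against three lists) into ONE character-level scan emitting codes directly (measured faster).

-- ===== PORT A =====
-- word lists of dicTipos (shared literals of both sources)
def pvL0 : List String := ["de", "da", "do", "das", "dos", "ao", "às", "aos", "à", "dum", "duma", "duns", "dumas", "no", "na", "nos", "nas", "num", "numa", "nuns", "numas", "por", "pelo", "pela", "pelos", "pelas"]
def pvL1 : List String := ["o", "a", "os", "as", "um", "uns", "uma", "umas"]
def pvL2 : List String := ["e", "nem", "mas também", "como também", "bem como", "mas", "porém", "todavia", "contudo", "logo", "portanto", "por conseguinte", "que", "porque", "porquanto", "pois"]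

def pvSeparadores (strTexto : List Char) : List Char :=
  (strTexto.foldl (fun acc i =>
      let teste := PySem.Chars.isdigit i || PySem.Chars.isupper i || PySem.Chars.islower i
      if !teste && i != '\n' then acc ++ [i] else acc) [])
    ++ ['º', 'ª', '°']

def pvInsereEspacos (strTexto : List Char) : List Char :=
  let separadores := pvSeparadores strTexto
  if strTexto.length > 0 then
    strTexto.foldl (fun acc c =>
      if !(separadores.contains c) && c != '\n' then acc ++ [c]
      else if c != '\n' then acc ++ [' ', c, ' ']
      else acc ++ ['.', ' ']) []
  else []

-- the while loop over posicao reads texto[posicao] for posicao = 0,…,len-1: a left fold over texto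
def pvTokenizador (ptxt : List Char) : List String × List Int :=
  let texto := pvInsereEspacos ptxt
  let separad := pvSeparadores texto
  let st := texto.foldl (fun (st : List String × List Char) c =>
      if !(separad.contains c) then (st.1, st.2 ++ [c])
      else
        let tks := if st.2 ≠ [] then st.1 ++ [String.ofList st.2] else st.1
        if c != ' ' then (tks ++ [String.ofList [c]], []) else (tks, []))
    ([], [])
  (if st.2 ≠ [] then st.1 ++ [String.ofList st.2] else st.1, [])

def pvDicTipos : PySem.Dict Int (List String) :=
  PySem.Dict.ofList [(0, pvL0), (1, pvL1), (2, pvL2)]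

def pvCodigos : List String := ["p", "a", "c"]

-- body of A's 'for i in tokens' loop: state = txtCodificado (as List Char);
-- 'while chave < 3' = fold over range(0,3); the match totalizes dicTipos[chave], codigos[chave]
-- and i[0] (the none cases are unreachable: chave ∈ {0,1,2} and tokens are nonempty)
def pvCodificaStep (txt : List Char) (i : String) : List Char :=
  let st := (PySem.List.pyRange 0 3 1).foldl (fun (st : List Char × Bool) chave =>
      match pvDicTipos.get? chave, PySem.List.pyGet? pvCodigos chave with
      | some ws, some c => if ws.contains (PySem.Str.lower i) then (st.1 ++ c.toList, false) else st
      | _, _ => st) (txt, true)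
  let st2 :=
    if st.2 then
      match PySem.Str.pyGet? i 0 with
      | some ch =>
        if PySem.Chars.isupper ch then (st.1 ++ ['M'], false)
        else if PySem.Chars.islower ch then (st.1 ++ ['m'], false)
        else if PySem.Str.strIsdigit i then (st.1 ++ ['N'], false)
        else st
      | none => st
    else st
  if st2.2 then st2.1 ++ i.toList else st2.1

def codifica (ptexto : String) : String :=
  let tokens := (pvTokenizador ptexto.toList).1
  if tokens.length == 0 then ""
  else String.ofList (tokens.foldl pvCodificaStep [])

-- ===== PORT B =====
-- _TABELA: one flat word→code dict, built by the comprehension's two nested loops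
def pvTabela : PySem.Dict String String :=
  ([("p", pvL0), ("a", pvL1), ("c", pvL2)] : List (String × List String)).foldl
    (fun d p => p.2.foldl (fun d w => d.insert w p.1) d) PySem.Dict.empty

def pvAlnum (ch : Char) : Bool :=
  PySem.Chars.isdigit ch || PySem.Chars.isupper ch || PySem.Chars.islower ch

-- _cod_palavra; w[0] totalized by the pyGet? match (none unreachable: callers pass nonempty w)
def pvCodPalavra (w : String) : String :=
  match pvTabela.get? (PySem.Str.lower w) with
  | some c => c
  | none =>
    match PySem.Str.pyGet? w 0 with
    | some ch =>
      if PySem.Chars.isupper ch then "M"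
      else if PySem.Chars.islower ch then "m"
      else if PySem.Str.strIsdigit w then "N"
      else w
    | none => w

-- single pass over the raw text: state = (out, buf); codes are emitted as soon as a word ends
def codifica_alt (ptexto : String) : String :=
  let st := ptexto.toList.foldl (fun (st : List String × List Char) ch =>
      if pvAlnum ch then (st.1, st.2 ++ [ch])
      else
        let out := if st.2 ≠ [] then st.1 ++ [pvCodPalavra (String.ofList st.2)] else st.1
        if ch == '\n' then (out ++ ["."], [])
        else if ch != ' ' then (out ++ [String.ofList [ch]], [])
        else (out, [])) ([], [])
  let out := if st.2 ≠ [] then st.1 ++ [pvCodPalavra (String.ofList st.2)] else st.1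
  PySem.Str.join "" out

-- ===== PRECONDITION & SPEC =====
def Spec_codifica (ptexto : String) (out : String) : Prop := out = codifica_alt ptexto
instance (ptexto : String) (out : String) : Decidable (Spec_codifica ptexto out) := by unfold Spec_codifica; infer_instance

-- ===== CLAIM (what is proved, stated in full; the proofs are below) =====
def Claim_equal_codifica : Prop := ∀ (ptexto : String), Dom_codifica ptexto → Spec_codifica ptexto (codifica ptexto)

-- ===== LEMMAS AND PROOFS =====

-- chunk that insereEspacos emits for one original character
def pvF (c : Char) : List Char :=
  if pvAlnum c then [c] else if c ≠ '\n' then [' ', c, ' '] else ['.', ' ']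

-- the two loop bodies, named so the folds can be reasoned about
def pvStepA (sep : List Char) (st : List String × List Char) (c : Char) : List String × List Char :=
  if !(sep.contains c) then (st.1, st.2 ++ [c])
  else
    let tks := if st.2 ≠ [] then st.1 ++ [String.ofList st.2] else st.1
    if c != ' ' then (tks ++ [String.ofList [c]], []) else (tks, [])

def pvStepB (st : List String × List Char) (ch : Char) : List String × List Char :=
  if pvAlnum ch then (st.1, st.2 ++ [ch])
  else
    let out := if st.2 ≠ [] then st.1 ++ [pvCodPalavra (String.ofList st.2)] else st.1
    if ch == '\n' then (out ++ ["."], [])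
    else if ch != ' ' then (out ++ [String.ofList [ch]], [])
    else (out, [])

theorem tokenizador_eq (ptxt : List Char) :
    pvTokenizador ptxt =
      (let texto := pvInsereEspacos ptxt
       let st := texto.foldl (pvStepA (pvSeparadores texto)) ([], [])
       (if st.2 ≠ [] then st.1 ++ [String.ofList st.2] else st.1, [])) := rfl

theorem alt_eq (ptexto : String) :
    codifica_alt ptexto =
      (let st := ptexto.toList.foldl pvStepB ([], [])
       let out := if st.2 ≠ [] then st.1 ++ [pvCodPalavra (String.ofList st.2)] else st.1
       PySem.Str.join "" out) := rfl

theorem sep_eq (l : List Char) :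
    pvSeparadores l = l.filter (fun c => !pvAlnum c && c != '\n') ++ ['\u00ba', '\u00aa', '\u00b0'] := by
  show (l.foldl (fun acc i => if (!pvAlnum i && i != '\n') then acc ++ [i] else acc) [])
      ++ ['\u00ba', '\u00aa', '\u00b0'] = _
  rw [PySem.List.foldl_append_if_eq_filter]
  rfl

theorem contains_sep {l : List Char} {c : Char} (hD : pvDomChar c = true) (hc : c ∈ l) :
    (pvSeparadores l).contains c = (!pvAlnum c && c != '\n') := by
  have hno : c ∉ (['\u00ba', '\u00aa', '\u00b0'] : List Char) := by
    intro h
    simp only [List.mem_cons, List.not_mem_nil, or_false] at h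
    rcases h with h | h | h <;> subst h <;> exact absurd hD (by decide)
  rw [sep_eq]
  cases hb : (!pvAlnum c && c != '\n') with
  | true => simp [List.contains_eq_mem, List.mem_filter, hc, hb]
  | false => simp [List.contains_eq_mem, List.mem_filter, hb, hno]

theorem insere_eq {l : List Char} (hD : ∀ c ∈ l, pvDomChar c = true) :
    pvInsereEspacos l = l.flatMap pvF := by
  show (if l.length > 0 then
          l.foldl (fun acc c =>
            if !((pvSeparadores l).contains c) && c != '\n' then acc ++ [c]
            else if c != '\n' then acc ++ [' ', c, ' ']
            else acc ++ ['.', ' ']) []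
        else []) = _
  by_cases hl : l = []
  · subst hl; rfl
  · rw [if_pos (by simpa [List.length_pos_iff] using hl)]
    rw [PySem.List.foldl_congr_mem' l _ (fun acc c => acc ++ pvF c) []
      (by
        intro c hc acc
        rw [contains_sep (hD c hc) hc]
        unfold pvF
        by_cases hA : pvAlnum c = true
        · have hn : c ≠ '\n' := by
            intro h; subst h; exact absurd hA (by decide)
          simp [hA, hn]
        · simp only [Bool.not_eq_true] at hA
          by_cases hn : c = '\n'
          · subst hn; simp [hA]
          · simp [hA, hn])]
    rw [PySem.List.foldl_append_eq_flatMap]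
    rfl

theorem flat_chars {l : List Char} (hD : ∀ c ∈ l, pvDomChar c = true) :
    ∀ c ∈ l.flatMap pvF, pvDomChar c = true ∧ c ≠ '\n' := by
  intro c hc
  rw [List.mem_flatMap] at hc
  obtain ⟨x, hx, hcx⟩ := hc
  unfold pvF at hcx
  split_ifs at hcx with h1 h2
  · simp only [List.mem_singleton] at hcx; subst hcx
    exact ⟨hD _ hx, by intro h; subst h; exact absurd h1 (by decide)⟩
  · simp only [List.mem_cons, List.not_mem_nil, or_false] at hcx
    rcases hcx with h | h | h
    · subst h; exact ⟨by decide, by decide⟩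
    · subst h; exact ⟨hD _ hx, h2⟩
    · subst h; exact ⟨by decide, by decide⟩
  · simp only [List.mem_cons, List.not_mem_nil, or_false] at hcx
    rcases hcx with h | h <;> subst h <;> exact ⟨by decide, by decide⟩

theorem contains_T {l : List Char} (hD : ∀ c ∈ l, pvDomChar c = true) {c : Char}
    (hc : c ∈ l.flatMap pvF) :
    (pvSeparadores (l.flatMap pvF)).contains c = !pvAlnum c := by
  obtain ⟨hDc, hn⟩ := flat_chars hD c hc
  rw [contains_sep hDc hc]
  simp [hn]

set_option maxRecDepth 8192 in
theorem pvTabela_items : pvTabela.items =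
    pvL0.map (fun w => (w, "p")) ++ pvL1.map (fun w => (w, "a")) ++ pvL2.map (fun w => (w, "c")) := by
  decide

set_option maxRecDepth 8192 in
theorem pvTabela_nodup : pvTabela.keys.Nodup := by decide

set_option maxRecDepth 8192 in
theorem pvTabela_keys : pvTabela.keys = pvL0 ++ pvL1 ++ pvL2 := by decide

theorem pvTabela_get? (w : String) :
    pvTabela.get? w =
      if pvL0.contains w then some "p"
      else if pvL1.contains w then some "a"
      else if pvL2.contains w then some "c"
      else none := by
  by_cases h0 : w ∈ pvL0
  · have hm : (w, "p") ∈ pvTabela.items := by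
      rw [pvTabela_items]; simp; tauto
    simp [PySem.Dict.get?_of_mem_items pvTabela hm pvTabela_nodup, h0]
  · by_cases h1 : w ∈ pvL1
    · have hm : (w, "a") ∈ pvTabela.items := by
        rw [pvTabela_items]; simp; tauto
      simp [PySem.Dict.get?_of_mem_items pvTabela hm pvTabela_nodup, h0, h1]
    · by_cases h2 : w ∈ pvL2
      · have hm : (w, "c") ∈ pvTabela.items := by
          rw [pvTabela_items]; simp; tauto
        simp [PySem.Dict.get?_of_mem_items pvTabela hm pvTabela_nodup, h0, h1, h2]
      · have hn : pvTabela.get? w = none := by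
          rw [PySem.Dict.get?_eq_none_iff_not_mem_keys, pvTabela_keys]
          simp; tauto
        simp [hn, h0, h1, h2]

set_option maxRecDepth 100000 in
theorem pvDisj0 : ∀ w ∈ pvL0, w ∉ pvL1 ∧ w ∉ pvL2 := by decide

set_option maxRecDepth 100000 in
theorem pvDisj1 : ∀ w ∈ pvL1, w ∉ pvL0 ∧ w ∉ pvL2 := by decide

set_option maxRecDepth 100000 in
theorem pvDisj2 : ∀ w ∈ pvL2, w ∉ pvL0 ∧ w ∉ pvL1 := by decide

set_option maxRecDepth 100000 in
theorem pvKeys1 : ∀ w ∈ pvL0 ++ pvL1 ++ pvL2, (String.toList w).length = 1 →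
    w = "o" ∨ w = "a" ∨ w = "e" ∨ w = "\u00e0" := by decide

-- a single non-word character is coded as itself
theorem cod1 {c : Char} (hD : pvDomChar c = true) (hA : pvAlnum c = false) :
    pvCodPalavra (String.ofList [c]) = String.ofList [c] := by
  have h3 : PySem.Chars.isdigit c = false ∧ PySem.Chars.isupper c = false ∧
      PySem.Chars.islower c = false := by
    unfold pvAlnum at hA
    simp only [Bool.or_eq_false_iff] at hA
    tauto
  obtain ⟨hd, hu, hlo⟩ := h3
  have hlow : PySem.Str.lower (String.ofList [c]) = String.ofList [c] := by
    apply String.toList_inj.mp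
    simp [pysem, PySem.Chars.lower, PySem.Chars.lowerChar, hu]
  have hkey : pvTabela.get? (String.ofList [c]) = none := by
    rw [PySem.Dict.get?_eq_none_iff_not_mem_keys, pvTabela_keys]
    intro hmem
    have h1 : (String.toList (String.ofList [c])).length = 1 := by simp
    rcases pvKeys1 _ hmem h1 with h | h | h | h <;>
      · have h' := congrArg String.toList h
        simp at h'
        subst h'
        revert hA hD
        decide
  unfold pvCodPalavra
  rw [hlow, hkey]
  have hget : PySem.Str.pyGet? (String.ofList [c]) 0 = some c := by
    simp [pysem, PySem.Chars.pyGet?]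
  rw [hget]
  simp [hu, hlo, PySem.Str.strIsdigit, PySem.Chars.strIsdigit, hd]

-- A codes a token exactly as _cod_palavra does
set_option maxRecDepth 16384 in
theorem step_eq (txt : List Char) (i : String) :
    pvCodificaStep txt i = txt ++ (pvCodPalavra i).toList := by
  have hr : PySem.List.pyRange 0 3 1 = [0, 1, 2] := by decide
  have hg0 : pvDicTipos.get? 0 = some pvL0 := by decide
  have hg1 : pvDicTipos.get? 1 = some pvL1 := by decide
  have hg2 : pvDicTipos.get? 2 = some pvL2 := by decide
  have hc0 : PySem.List.pyGet? pvCodigos 0 = some "p" := by decide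
  have hc1 : PySem.List.pyGet? pvCodigos 1 = some "a" := by decide
  have hc2 : PySem.List.pyGet? pvCodigos 2 = some "c" := by decide
  by_cases h0 : PySem.Str.lower i ∈ pvL0
  · obtain ⟨n1, n2⟩ := pvDisj0 _ h0
    have hB : pvCodPalavra i = "p" := by
      unfold pvCodPalavra; rw [pvTabela_get?, if_pos (by simpa using h0)]
    rw [hB]
    simp [pvCodificaStep, hr, hg0, hg1, hg2, hc0, hc1, hc2, h0, n1, n2]
  · by_cases h1 : PySem.Str.lower i ∈ pvL1
    · obtain ⟨n0, n2⟩ := pvDisj1 _ h1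
      have hB : pvCodPalavra i = "a" := by
        unfold pvCodPalavra
        rw [pvTabela_get?, if_neg (by simpa using h0), if_pos (by simpa using h1)]
      rw [hB]
      simp [pvCodificaStep, hr, hg0, hg1, hg2, hc0, hc1, hc2, h0, h1, n2]
    · by_cases h2 : PySem.Str.lower i ∈ pvL2
      · obtain ⟨n0, n1⟩ := pvDisj2 _ h2
        have hB : pvCodPalavra i = "c" := by
          unfold pvCodPalavra
          rw [pvTabela_get?, if_neg (by simpa using h0), if_neg (by simpa using h1),
            if_pos (by simpa using h2)]
        rw [hB]
        simp [pvCodificaStep, hr, hg0, hg1, hg2, hc0, hc1, hc2, h0, h1, h2]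
      · have hB : pvTabela.get? (PySem.Str.lower i) = none := by
          rw [pvTabela_get?, if_neg (by simpa using h0), if_neg (by simpa using h1),
            if_neg (by simpa using h2)]
        unfold pvCodificaStep pvCodPalavra
        rw [hB, hr]
        simp only [List.foldl_cons, List.foldl_nil, hg0, hg1, hg2, hc0, hc1, hc2]
        simp only [h0, h1, h2, decide_false, List.contains_eq_mem]
        cases hc : PySem.Str.pyGet? i 0 with
        | none => simp
        | some ch => simp; split_ifs <;> simp_all

theorem fold_eq (tokens : List String) (acc : List Char) :
    tokens.foldl pvCodificaStep acc = acc ++ (tokens.map (fun t => (pvCodPalavra t).toList)).flatten := by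
  induction tokens generalizing acc with
  | nil => simp
  | cons t ts ih => simp [List.foldl_cons, step_eq, ih]

theorem join_nil_sep (l : List (List Char)) : PySem.Chars.join [] l = l.flatten := by
  simp [PySem.Chars.join, List.intercalate]
  induction l with
  | nil => rfl
  | cons x xs ih => cases xs <;> simp_all [List.intersperse]

theorem out_eq (tokens : List String) :
    String.ofList (tokens.foldl pvCodificaStep []) = PySem.Str.join "" (tokens.map pvCodPalavra) := by
  apply String.toList_inj.mp
  rw [fold_eq]
  simp [pysem, join_nil_sep, List.map_map, Function.comp_def]

theorem flush_map (tks : List String) (buf : List Char) :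
    (if buf ≠ [] then tks ++ [String.ofList buf] else tks).map pvCodPalavra =
      (if buf ≠ [] then tks.map pvCodPalavra ++ [pvCodPalavra (String.ofList buf)]
       else tks.map pvCodPalavra) := by
  split_ifs <;> simp

-- the tokenizer's fold over the spaced text and B's fold over the raw text evolve in lockstep
theorem scan_eq {L : List Char} (hD : ∀ c ∈ L, pvDomChar c = true)
    (l : List Char) (hl : ∀ c ∈ l, c ∈ L)
    (tks outs : List String) (buf : List Char)
    (hout : outs = tks.map pvCodPalavra) :
    ((l.flatMap pvF).foldl (pvStepA (pvSeparadores (L.flatMap pvF))) (tks, buf)).2 =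
      (l.foldl pvStepB (outs, buf)).2 ∧
    (l.foldl pvStepB (outs, buf)).1 =
      ((l.flatMap pvF).foldl (pvStepA (pvSeparadores (L.flatMap pvF))) (tks, buf)).1.map
        pvCodPalavra := by
  induction l generalizing tks outs buf with
  | nil => exact ⟨rfl, hout⟩
  | cons c l' ih =>
    have hcL : c ∈ L := hl c (List.mem_cons_self ..)
    have hl' : ∀ x ∈ l', x ∈ L := fun x hx => hl x (List.mem_cons_of_mem _ hx)
    have hmem : ∀ x ∈ pvF c, x ∈ L.flatMap pvF := fun x hx =>
      List.mem_flatMap.mpr ⟨c, hcL, hx⟩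
    have hDc : pvDomChar c = true := hD c hcL
    rw [List.flatMap_cons, List.foldl_append, List.foldl_cons]
    by_cases hA : pvAlnum c = true
    · have hF : pvF c = [c] := by simp [pvF, hA]
      have hco : c ∉ pvSeparadores (L.flatMap pvF) := by
        have h := contains_T hD (hmem c (by rw [hF]; exact List.mem_singleton_self c))
        rw [hA] at h
        simpa using h
      have hsA : pvStepA (pvSeparadores (L.flatMap pvF)) (tks, buf) c = (tks, buf ++ [c]) := by
        simp [pvStepA, hco]
      have hsB : pvStepB (outs, buf) c = (outs, buf ++ [c]) := by
        simp [pvStepB, hA]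
      rw [hF]
      simp only [List.foldl_cons, List.foldl_nil, hsA, hsB]
      exact ih hl' tks outs (buf ++ [c]) hout
    · have hAf : pvAlnum c = false := by simpa using hA
      by_cases hn : c = '\n'
      · subst hn
        have hF : pvF '\n' = ['.', ' '] := by decide
        have hcd : '.' ∈ pvSeparadores (L.flatMap pvF) := by
          have h := contains_T hD (hmem '.' (by rw [hF]; simp))
          rw [show (!pvAlnum '.') = true from by decide] at h
          simpa using h
        have hcs : ' ' ∈ pvSeparadores (L.flatMap pvF) := by
          have h := contains_T hD (hmem ' ' (by rw [hF]; simp))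
          rw [show (!pvAlnum ' ') = true from by decide] at h
          simpa using h
        have hsA1 : pvStepA (pvSeparadores (L.flatMap pvF)) (tks, buf) '.' =
            ((if buf ≠ [] then tks ++ [String.ofList buf] else tks) ++ [String.ofList ['.']], []) := by
          simp [pvStepA, hcd]
        have hsA2 : ∀ t : List String,
            pvStepA (pvSeparadores (L.flatMap pvF)) (t, ([] : List Char)) ' ' = (t, []) := by
          intro t; simp [pvStepA, hcs]
        have hsB : pvStepB (outs, buf) '\n' =
            ((if buf ≠ [] then outs ++ [pvCodPalavra (String.ofList buf)] else outs) ++ ["."], []) := by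
          simp [pvStepB, hAf]
        rw [hF]
        simp only [List.foldl_cons, List.foldl_nil, hsA1, hsB]
        rw [hsA2]
        apply ih hl'
        rw [List.map_append, flush_map, hout]
        simp only [List.map_cons, List.map_nil,
          cod1 (show pvDomChar '.' = true from by decide) (show pvAlnum '.' = false from by decide)]
      · have hF : pvF c = [' ', c, ' '] := by simp [pvF, hA, hn]
        have hcs : ' ' ∈ pvSeparadores (L.flatMap pvF) := by
          have h := contains_T hD (hmem ' ' (by rw [hF]; simp))
          rw [show (!pvAlnum ' ') = true from by decide] at h
          simpa using h
        have hsA1 : pvStepA (pvSeparadores (L.flatMap pvF)) (tks, buf) ' ' =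
            ((if buf ≠ [] then tks ++ [String.ofList buf] else tks), []) := by
          simp [pvStepA, hcs]
        have hsA2 : ∀ t : List String,
            pvStepA (pvSeparadores (L.flatMap pvF)) (t, ([] : List Char)) ' ' = (t, []) := by
          intro t; simp [pvStepA, hcs]
        rw [hF]
        simp only [List.foldl_cons, List.foldl_nil, hsA1]
        by_cases hsp : c = ' '
        · subst hsp
          have hsB : pvStepB (outs, buf) ' ' =
              ((if buf ≠ [] then outs ++ [pvCodPalavra (String.ofList buf)] else outs), []) := by
            simp [pvStepB, hAf]
          simp only [hsA2, hsB]
          apply ih hl'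
          rw [flush_map, hout]
        · have hcc : c ∈ pvSeparadores (L.flatMap pvF) := by
            have h := contains_T hD (hmem c (by rw [hF]; simp))
            rw [hAf] at h
            simpa using h
          have hsA3 : ∀ t : List String,
              pvStepA (pvSeparadores (L.flatMap pvF)) (t, ([] : List Char)) c =
                (t ++ [String.ofList [c]], []) := by
            intro t; simp [pvStepA, hcc, hsp]
          have hsB : pvStepB (outs, buf) c =
              ((if buf ≠ [] then outs ++ [pvCodPalavra (String.ofList buf)] else outs) ++
                [String.ofList [c]], []) := by
            simp [pvStepB, hAf, hn, hsp]
          simp only [hsA3, hsA2, hsB]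
          apply ih hl'
          rw [List.map_append, flush_map, hout]
          simp only [List.map_cons, List.map_nil, cod1 hDc hAf]

-- ===== VERDICT (by name: the statement is the Claim_ definition above) =====
theorem codifica_spec : Claim_equal_codifica := by
  intro p hDom
  have hD : ∀ c ∈ p.toList, pvDomChar c = true := by
    have := hDom
    unfold Dom_codifica pvDomStr at this
    simpa [List.all_eq_true] using this
  unfold Spec_codifica codifica
  rw [tokenizador_eq, alt_eq]
  simp only [insere_eq hD]
  obtain ⟨h2, h1⟩ := scan_eq hD p.toList (fun c hc => hc) [] [] [] rfl
  set stA := (p.toList.flatMap pvF).foldl (pvStepA (pvSeparadores (p.toList.flatMap pvF))) ([], [])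
  set stB := p.toList.foldl pvStepB ([], [])
  have houts : (if stB.2 ≠ [] then stB.1 ++ [pvCodPalavra (String.ofList stB.2)] else stB.1) =
      (if stA.2 ≠ [] then stA.1 ++ [String.ofList stA.2] else stA.1).map pvCodPalavra := by
    rw [flush_map, h1, ← h2]
  rw [houts]
  set tokens := if stA.2 ≠ [] then stA.1 ++ [String.ofList stA.2] else stA.1
  by_cases ht : tokens.length = 0
  · have : tokens = [] := List.length_eq_zero_iff.mp ht
    rw [this]
    simp [PySem.Str.join, PySem.Chars.join_nil]
  · rw [if_neg (by simpa using ht)]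
    exact out_eq tokens
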